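-- pv_equiv track=rewrite | github.com/claasklar/de_claasklar.devtools | plugins/modules/devtools_build.py | pkg_infos
-- ===== SOURCE A (Python) =====
-- def pkg_infos(srcinfo):
--     packages = []
--     version_info = {"pkgname": None, "pkgver": None, "pkgrel": None}
--
--     for line in srcinfo.splitlines():
--         line = line.strip()
--         if line.startswith("pkgver ="):
--             version_info["pkgver"] = line.partition(" = ")[2]
--         if line.startswith("pkgrel ="):
--             version_info["pkgrel"] = line.partition(" = ")[2]
--
--     for line in srcinfo.splitlines():
--         line = line.strip()
--         if line.startswith("pkgname ="):
--             pkgname = line.partition(" = ")[2]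
--             pkg_version_info = dict(version_info)
--             pkg_version_info["pkgname"] = pkgname
--             packages.append(pkg_version_info)
--
--     return packages
-- ===== SOURCE B (Python) =====
-- def pkg_infos(srcinfo):
--     names = []
--     pkgver = None
--     pkgrel = None
--     for line in srcinfo.splitlines():
--         line = line.strip()
--         if line.startswith("pkgname ="):
--             names.append(line.partition(" = ")[2])
--         if line.startswith("pkgver ="):
--             pkgver = line.partition(" = ")[2]
--         if line.startswith("pkgrel ="):
--             pkgrel = line.partition(" = ")[2]
--     return [{"pkgname": n, "pkgver": pkgver, "pkgrel": pkgrel} for n in names]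
-- ===== Notes on version B (the rewrite author's own statement) =====
-- stated objective: simpler
-- what changed: Replaces A's two full passes over the lines (one for pkgver/pkgrel, one for pkgname) and its mutable dict template with a single scan that collects names and the running version fields, followed by one construction comprehension.
import Mathlib
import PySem

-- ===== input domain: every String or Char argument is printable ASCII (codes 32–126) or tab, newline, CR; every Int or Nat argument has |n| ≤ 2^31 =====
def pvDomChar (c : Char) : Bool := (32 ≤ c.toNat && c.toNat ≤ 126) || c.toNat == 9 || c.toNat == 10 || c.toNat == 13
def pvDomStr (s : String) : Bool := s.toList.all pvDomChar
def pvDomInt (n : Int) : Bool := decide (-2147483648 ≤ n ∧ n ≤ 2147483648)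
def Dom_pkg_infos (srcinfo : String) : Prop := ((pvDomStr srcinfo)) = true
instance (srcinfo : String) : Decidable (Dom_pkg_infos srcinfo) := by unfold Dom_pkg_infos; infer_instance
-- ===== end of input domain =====

-- B folds A's two passes over the stripped lines into one scan plus a construction phase; return value only, no mutation.

-- hand port of line.partition(" = ")[2] (PySem has no partition): Python returns the part after the
-- FIRST occurrence of the (nonempty) separator, and "" when the separator is absent; PySem.Chars.find
-- is exactly that first occurrence (-1 when absent), so this is exact.
def pvPartitionAfter (s sep : String) : String :=
  let i := PySem.Chars.find s.toList sep.toList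
  if i = -1 then "" else String.ofList (s.toList.drop (i.toNat + sep.toList.length))

-- ===== PORT A =====
def pkg_infos (srcinfo : String) : List (List (String × Option String)) :=
  let lines := PySem.Str.splitlines srcinfo
  let vi0 : PySem.Dict String (Option String) :=
    PySem.Dict.ofList [("pkgname", none), ("pkgver", none), ("pkgrel", none)]
  let vi := lines.foldl (fun d line =>
      let line := PySem.Str.strip line
      let d := if PySem.Str.startswith line "pkgver =" then
                 d.insert "pkgver" (some (pvPartitionAfter line " = ")) else d
      if PySem.Str.startswith line "pkgrel =" then
        d.insert "pkgrel" (some (pvPartitionAfter line " = ")) else d) vi0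
  lines.foldl (fun packages line =>
      let line := PySem.Str.strip line
      if PySem.Str.startswith line "pkgname =" then
        packages ++ [(vi.insert "pkgname" (some (pvPartitionAfter line " = "))).items]
      else packages) []

-- ===== PORT B =====
def pkg_infos_alt (srcinfo : String) : List (List (String × Option String)) :=
  let st := (PySem.Str.splitlines srcinfo).foldl
      (fun (st : List String × Option String × Option String) line =>
        let line := PySem.Str.strip line
        let names := if PySem.Str.startswith line "pkgname =" then
                       st.1 ++ [pvPartitionAfter line " = "] else st.1
        let ver := if PySem.Str.startswith line "pkgver =" then
                     some (pvPartitionAfter line " = ") else st.2.1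
        let rel := if PySem.Str.startswith line "pkgrel =" then
                     some (pvPartitionAfter line " = ") else st.2.2
        (names, ver, rel))
      ([], none, none)
  st.1.map (fun n => [("pkgname", some n), ("pkgver", st.2.1), ("pkgrel", st.2.2)])

-- ===== PRECONDITION & SPEC =====
def Spec_pkg_infos (srcinfo : String) (out : List (List (String × Option String))) : Prop := out = pkg_infos_alt srcinfo
instance (srcinfo : String) (out : List (List (String × Option String))) : Decidable (Spec_pkg_infos srcinfo out) := by unfold Spec_pkg_infos; infer_instance

-- ===== CLAIM (what is proved, stated in full; the proofs are below) =====
def Claim_equal_pkg_infos : Prop := ∀ (srcinfo : String), Dom_pkg_infos srcinfo → Spec_pkg_infos srcinfo (pkg_infos srcinfo)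

-- ===== LEMMAS AND PROOFS =====

-- the fixed dict shape A's version_info keeps throughout
def pvD (v r : Option String) : PySem.Dict String (Option String) :=
  PySem.Dict.mk [("pkgname", none), ("pkgver", v), ("pkgrel", r)]

-- closed recursions describing the final pkgver / pkgrel and the name list
def pvVer : List String → Option String → Option String
  | [], v => v
  | l :: ls, v =>
      let s := PySem.Str.strip l
      pvVer ls (if PySem.Str.startswith s "pkgver =" then some (pvPartitionAfter s " = ") else v)

def pvRel : List String → Option String → Option String
  | [], r => r
  | l :: ls, r =>
      let s := PySem.Str.strip l
      pvRel ls (if PySem.Str.startswith s "pkgrel =" then some (pvPartitionAfter s " = ") else r)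

def pvNamesR : List String → List String
  | [] => []
  | l :: ls =>
      let s := PySem.Str.strip l
      (if PySem.Str.startswith s "pkgname =" then [pvPartitionAfter s " = "] else []) ++ pvNamesR ls

theorem pvD_insert_ver (v r : Option String) (x : Option String) :
    (pvD v r).insert "pkgver" x = pvD x r := rfl

theorem pvD_insert_rel (v r : Option String) (x : Option String) :
    (pvD v r).insert "pkgrel" x = pvD v x := rfl

theorem pvD_insert_name_items (v r : Option String) (x : Option String) :
    ((pvD v r).insert "pkgname" x).items = [("pkgname", x), ("pkgver", v), ("pkgrel", r)] := rfl

-- A's first pass keeps the pvD shape and computes pvVer / pvRel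
theorem pkgA_ver_fold (lines : List String) : ∀ (v r : Option String),
    lines.foldl (fun d line =>
      let line := PySem.Str.strip line
      let d := if PySem.Str.startswith line "pkgver =" then
                 d.insert "pkgver" (some (pvPartitionAfter line " = ")) else d
      if PySem.Str.startswith line "pkgrel =" then
        d.insert "pkgrel" (some (pvPartitionAfter line " = ")) else d) (pvD v r)
    = pvD (pvVer lines v) (pvRel lines r) := by
  induction lines with
  | nil => intro v r; rfl
  | cons l ls ih =>
      intro v r
      simp only [List.foldl_cons, pvVer, pvRel]
      split_ifs <;>
        first
        | rw [pvD_insert_ver, pvD_insert_rel, ih]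
        | rw [pvD_insert_ver, ih]
        | rw [pvD_insert_rel, ih]
        | rw [ih]

-- A's second pass appends one record per collected name
theorem pkgA_names_fold (lines : List String) (d : PySem.Dict String (Option String)) :
    ∀ (pkgs : List (List (String × Option String))),
    lines.foldl (fun packages line =>
      let line := PySem.Str.strip line
      if PySem.Str.startswith line "pkgname =" then
        packages ++ [(d.insert "pkgname" (some (pvPartitionAfter line " = "))).items]
      else packages) pkgs
    = pkgs ++ (pvNamesR lines).map (fun n => (d.insert "pkgname" (some n)).items) := by
  induction lines with
  | nil => intro pkgs; simp [pvNamesR]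
  | cons l ls ih =>
      intro pkgs
      simp only [List.foldl_cons, pvNamesR]
      split_ifs with h <;> rw [ih] <;> simp

-- B's single scan computes the same three components
theorem pkgB_fold (lines : List String) : ∀ (ns : List String) (v r : Option String),
    lines.foldl
      (fun (st : List String × Option String × Option String) line =>
        let line := PySem.Str.strip line
        let names := if PySem.Str.startswith line "pkgname =" then
                       st.1 ++ [pvPartitionAfter line " = "] else st.1
        let ver := if PySem.Str.startswith line "pkgver =" then
                     some (pvPartitionAfter line " = ") else st.2.1
        let rel := if PySem.Str.startswith line "pkgrel =" then
                     some (pvPartitionAfter line " = ") else st.2.2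
        (names, ver, rel)) (ns, v, r)
    = (ns ++ pvNamesR lines, pvVer lines v, pvRel lines r) := by
  induction lines with
  | nil => intro ns v r; simp [pvNamesR, pvVer, pvRel]
  | cons l ls ih =>
      intro ns v r
      simp only [List.foldl_cons, pvNamesR, pvVer, pvRel]
      split_ifs <;> rw [ih] <;> simp

-- ===== VERDICT (by name: the statement is the Claim_ definition above) =====
theorem pkg_infos_spec : Claim_equal_pkg_infos := by
  intro srcinfo _
  show pkg_infos srcinfo = pkg_infos_alt srcinfo
  have h0 : (PySem.Dict.ofList [("pkgname", none), ("pkgver", none), ("pkgrel", none)] :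
      PySem.Dict String (Option String)) = pvD none none := rfl
  simp only [pkg_infos, pkg_infos_alt, h0]
  rw [pkgA_ver_fold, pkgB_fold,
      pkgA_names_fold (PySem.Str.splitlines srcinfo)
        (pvD (pvVer (PySem.Str.splitlines srcinfo) none) (pvRel (PySem.Str.splitlines srcinfo) none)) []]
  simp only [List.nil_append, pvD_insert_name_items]
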